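-- pv_equiv track=rewrite | github.com/AnirG/AAD-Project | app/codes/SHA256.py | Choice
-- ===== SOURCE A (Python) =====
-- two_pow_32=4294967296
--
-- def Choice(x,y,z):
--     x = x % two_pow_32
--     y = y % two_pow_32
--     z = z % two_pow_32
--     ans = 0
--     for i in range(0,32):
--         if(x&(1<<i) == (1<<i)):
--             ans+= (y&(1<<i))
--         else:
--             ans+= (z&(1<<i))
--     return ans
-- ===== SOURCE B (Python) =====
-- two_pow_32 = 4294967296
--
-- def Choice(x, y, z):
--     x = x % two_pow_32
--     y = y % two_pow_32
--     z = z % two_pow_32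
--     return (x & y) | ((x ^ 0xFFFFFFFF) & z)
-- ===== Notes on version B (the rewrite author's own statement) =====
-- stated objective: simpler
-- what changed: Replaced the 32-iteration per-bit accumulation loop with the single closed-form branchless expression (x & y) | ((x ^ 0xFFFFFFFF) & z) after the same mod-2^32 reductions.
import Mathlib
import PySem

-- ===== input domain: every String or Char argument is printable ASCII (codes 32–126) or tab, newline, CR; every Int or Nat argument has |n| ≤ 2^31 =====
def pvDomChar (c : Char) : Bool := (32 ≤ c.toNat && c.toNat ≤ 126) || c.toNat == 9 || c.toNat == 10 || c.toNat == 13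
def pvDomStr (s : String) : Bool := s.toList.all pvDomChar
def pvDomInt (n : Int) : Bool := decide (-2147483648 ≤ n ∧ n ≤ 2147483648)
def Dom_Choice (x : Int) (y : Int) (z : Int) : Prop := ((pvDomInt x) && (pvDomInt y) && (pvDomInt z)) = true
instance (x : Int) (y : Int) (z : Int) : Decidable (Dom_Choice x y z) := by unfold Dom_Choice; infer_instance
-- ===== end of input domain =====

-- B replaces A's 32-iteration per-bit loop by the closed-form branchless expression
-- (x & y) | ((x ^ 0xFFFFFFFF) & z) after the same mod-2^32 reductions (objective: simpler).

-- ===== PORT A =====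
-- '1 << i' is ported as '(1 : Int) <<< i.toNat' — exact here since every i drawn from range(0,32) is nonnegative
def Choice (x : Int) (y : Int) (z : Int) : Int :=
  let x := PySem.Int.mod x 4294967296
  let y := PySem.Int.mod y 4294967296
  let z := PySem.Int.mod z 4294967296
  (PySem.List.pyRange 0 32 1).foldl
    (fun ans i =>
      if PySem.Int.band x ((1 : Int) <<< i.toNat) = (1 : Int) <<< i.toNat then
        ans + PySem.Int.band y ((1 : Int) <<< i.toNat)
      else
        ans + PySem.Int.band z ((1 : Int) <<< i.toNat)) 0

-- ===== PORT B =====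
def Choice_alt (x : Int) (y : Int) (z : Int) : Int :=
  let x := PySem.Int.mod x 4294967296
  let y := PySem.Int.mod y 4294967296
  let z := PySem.Int.mod z 4294967296
  PySem.Int.bor (PySem.Int.band x y) (PySem.Int.band (PySem.Int.bxor x 4294967295) z)

-- ===== PRECONDITION & SPEC =====
def Spec_Choice (x : Int) (y : Int) (z : Int) (out : Int) : Prop := out = Choice_alt x y z
instance (x : Int) (y : Int) (z : Int) (out : Int) : Decidable (Spec_Choice x y z out) := by unfold Spec_Choice; infer_instance

-- ===== CLAIM (what is proved, stated in full; the proofs are below) =====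
def Claim_equal_Choice : Prop := ∀ (x : Int) (y : Int) (z : Int), Dom_Choice x y z → Spec_Choice x y z (Choice x y z)

-- ===== LEMMAS AND PROOFS =====

theorem and_two_pow_eq_iff (X i : ℕ) : (X &&& 2 ^ i = 2 ^ i) ↔ X.testBit i = true := by
  rw [Nat.and_two_pow]
  cases h : X.testBit i
  · simpa using (Nat.two_pow_pos i).ne
  · simp

theorem mod_two_pow_succ (x n : ℕ) : x % 2 ^ (n + 1) = x % 2 ^ n + (x.testBit n).toNat * 2 ^ n := by
  have h1 : x % (2 ^ n * 2) = x % 2 ^ n + 2 ^ n * (x / 2 ^ n % 2) := Nat.mod_mul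
  have h2 : (x.testBit n).toNat = x / 2 ^ n % 2 := by
    rcases Nat.mod_two_eq_zero_or_one (x / 2 ^ n) with h | h <;>
      simp [Nat.testBit, Nat.shiftRight_eq_div_pow, h]
  rw [pow_succ, h1, h2]; ring

/-- the bit of B's combined value -/
theorem testBit_T (X Y Z i : ℕ) (hi : i < 32) :
    (X &&& Y ||| (X ^^^ 4294967295) &&& Z).testBit i
      = (if X.testBit i then Y.testBit i else Z.testBit i) := by
  have hm : (4294967295 : ℕ).testBit i = true := by
    have h32 : (4294967295 : ℕ) = 2 ^ 32 - 1 := by norm_num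
    rw [h32, Nat.testBit_two_pow_sub_one]; simp [hi]
  cases h : X.testBit i <;> simp [Nat.testBit_or, Nat.testBit_and, Nat.testBit_xor, h, hm]

theorem sum_term_mod (X Y Z : ℕ) (n : ℕ) (hn : n ≤ 32) :
    ((List.range n).map (fun k => if X &&& 2 ^ k = 2 ^ k then Y &&& 2 ^ k else Z &&& 2 ^ k)).sum
      = (X &&& Y ||| (X ^^^ 4294967295) &&& Z) % 2 ^ n := by
  induction n with
  | zero => simp [Nat.mod_one]
  | succ m ih =>
    rw [List.range_succ, List.map_append, List.sum_append, ih (by omega), mod_two_pow_succ]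
    have hstep : (if X &&& 2 ^ m = 2 ^ m then Y &&& 2 ^ m else Z &&& 2 ^ m)
        = ((X &&& Y ||| (X ^^^ 4294967295) &&& Z).testBit m).toNat * 2 ^ m := by
      rw [testBit_T X Y Z m (by omega)]
      cases h : X.testBit m
      · simp [h, Nat.and_two_pow, (Nat.two_pow_pos m).ne]
      · simp [(and_two_pow_eq_iff X m).mpr h, Nat.and_two_pow]
    simp [hstep]

theorem key (X Y Z : ℕ) (hY : Y < 2 ^ 32) (hZ : Z < 2 ^ 32) :
    ((List.range 32).map (fun k => if X &&& 2 ^ k = 2 ^ k then Y &&& 2 ^ k else Z &&& 2 ^ k)).sum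
      = X &&& Y ||| (X ^^^ 4294967295) &&& Z := by
  rw [sum_term_mod X Y Z 32 le_rfl]
  exact Nat.mod_eq_of_lt (Nat.or_lt_two_pow (lt_of_le_of_lt Nat.and_le_right hY)
    (lt_of_le_of_lt Nat.and_le_right hZ))

theorem cast_sum_map (f : ℕ → ℕ) (l : List ℕ) :
    (l.map (fun k => ((f k : ℕ) : Int))).sum = ((l.map f).sum : Int) := by
  induction l <;> simp_all

theorem core (X Y Z : ℕ) (hY : Y < 2 ^ 32) (hZ : Z < 2 ^ 32) :
    (PySem.List.pyRange 0 32 1).foldl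
      (fun ans i =>
        if PySem.Int.band (X : Int) ((1 : Int) <<< ((i.toNat : ℕ) : Int)) = (1 : Int) <<< ((i.toNat : ℕ) : Int) then
          ans + PySem.Int.band (Y : Int) ((1 : Int) <<< ((i.toNat : ℕ) : Int))
        else
          ans + PySem.Int.band (Z : Int) ((1 : Int) <<< ((i.toNat : ℕ) : Int))) 0
      = PySem.Int.bor (PySem.Int.band (X : Int) (Y : Int))
          (PySem.Int.band (PySem.Int.bxor (X : Int) 4294967295) (Z : Int)) := by
  have hbody : ∀ (ans : Int) (i : Int),
      (if PySem.Int.band (X : Int) ((1 : Int) <<< ((i.toNat : ℕ) : Int)) = (1 : Int) <<< ((i.toNat : ℕ) : Int) then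
        ans + PySem.Int.band (Y : Int) ((1 : Int) <<< ((i.toNat : ℕ) : Int))
      else
        ans + PySem.Int.band (Z : Int) ((1 : Int) <<< ((i.toNat : ℕ) : Int)))
      = ans + (if PySem.Int.band (X : Int) ((1 : Int) <<< ((i.toNat : ℕ) : Int)) = (1 : Int) <<< ((i.toNat : ℕ) : Int) then
          PySem.Int.band (Y : Int) ((1 : Int) <<< ((i.toNat : ℕ) : Int))
        else PySem.Int.band (Z : Int) ((1 : Int) <<< ((i.toNat : ℕ) : Int))) := by
    intro ans i; split <;> rfl
  refine Eq.trans (PySem.List.foldl_congr_mem _ _ _ _ (fun acc i _ => hbody acc i)) ?_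
  rw [PySem.List.foldl_add, zero_add]
  rw [PySem.List.pyRange_one, List.map_map]
  have hterm : ∀ k : ℕ,
      ((fun i : Int => if PySem.Int.band (X : Int) ((1 : Int) <<< ((i.toNat : ℕ) : Int)) = (1 : Int) <<< ((i.toNat : ℕ) : Int) then
          PySem.Int.band (Y : Int) ((1 : Int) <<< ((i.toNat : ℕ) : Int))
        else PySem.Int.band (Z : Int) ((1 : Int) <<< ((i.toNat : ℕ) : Int))) ∘ fun k : ℕ => (0 : Int) + (k : Int)) k
      = ((if X &&& 2 ^ k = 2 ^ k then Y &&& 2 ^ k else Z &&& 2 ^ k : ℕ) : Int) := by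
    intro k
    have htn : ((0 : Int) + (k : Int)).toNat = k := by simp
    have hsh : (1 : Int) <<< ((k : ℕ) : Int) = (((2 ^ k : ℕ)) : Int) := Int.one_shiftLeft k
    simp only [Function.comp, htn]
    simp only [hsh, PySem.Int.band_natCast]
    by_cases h : X &&& 2 ^ k = 2 ^ k
    · rw [if_pos (by exact_mod_cast h), if_pos h]
    · rw [if_neg (by exact_mod_cast h : ¬((X &&& 2 ^ k : ℕ) : Int) = (((2 ^ k : ℕ)) : Int)), if_neg h]
  have h320 : ((32 : Int) - 0).toNat = 32 := by decide
  rw [h320, List.map_congr_left (fun k _ => hterm k)]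
  rw [cast_sum_map, key X Y Z hY hZ]
  have hmask : (4294967295 : Int) = ((4294967295 : ℕ) : Int) := by norm_num
  rw [hmask]
  simp only [PySem.Int.bxor_natCast, PySem.Int.band_natCast, PySem.Int.bor_natCast]

-- ===== VERDICT (by name: the statement is the Claim_ definition above) =====
theorem Choice_eqA (x y z : Int) : Choice x y z = (PySem.List.pyRange 0 32 1).foldl
    (fun ans i =>
      if PySem.Int.band (PySem.Int.mod x 4294967296) ((1 : Int) <<< ((i.toNat : ℕ) : Int)) = (1 : Int) <<< ((i.toNat : ℕ) : Int) then
        ans + PySem.Int.band (PySem.Int.mod y 4294967296) ((1 : Int) <<< ((i.toNat : ℕ) : Int))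
      else
        ans + PySem.Int.band (PySem.Int.mod z 4294967296) ((1 : Int) <<< ((i.toNat : ℕ) : Int))) 0 := rfl

theorem Choice_alt_eqB (x y z : Int) : Choice_alt x y z =
    PySem.Int.bor (PySem.Int.band (PySem.Int.mod x 4294967296) (PySem.Int.mod y 4294967296))
      (PySem.Int.band (PySem.Int.bxor (PySem.Int.mod x 4294967296) 4294967295)
        (PySem.Int.mod z 4294967296)) := rfl

theorem Choice_spec : Claim_equal_Choice := by
  intro x y z _
  unfold Spec_Choice
  have hNpos : (0:Int) < 4294967296 := by norm_num
  obtain ⟨X, hXa⟩ : ∃ X : ℕ, PySem.Int.mod x 4294967296 = (X : Int) :=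
    ⟨_, (Int.toNat_of_nonneg (PySem.Int.mod_nonneg x hNpos)).symm⟩
  obtain ⟨Y, hYb⟩ : ∃ Y : ℕ, PySem.Int.mod y 4294967296 = (Y : Int) :=
    ⟨_, (Int.toNat_of_nonneg (PySem.Int.mod_nonneg y hNpos)).symm⟩
  obtain ⟨Z, hZc⟩ : ∃ Z : ℕ, PySem.Int.mod z 4294967296 = (Z : Int) :=
    ⟨_, (Int.toNat_of_nonneg (PySem.Int.mod_nonneg z hNpos)).symm⟩
  have hpow : (2 : ℕ) ^ 32 = 4294967296 := by norm_num
  have hY : Y < 2 ^ 32 := by have h := hYb ▸ PySem.Int.mod_lt y hNpos; omega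
  have hZ : Z < 2 ^ 32 := by have h := hZc ▸ PySem.Int.mod_lt z hNpos; omega
  rw [Choice_eqA, Choice_alt_eqB, hXa, hYb, hZc]
  exact core X Y Z hY hZ
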